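-- pv_equiv track=rewrite | github.com/JMPinillos/python | hola_mundo/workspace/curso-py/tipos-avanzados/Ejercicio.py | mayores_tuplas
-- ===== SOURCE A (Python) =====
-- def mayores_tuplas(tuplas):
--     mayor_valor = 0
--     respuesta = []
--
--     for char in tuplas:
--
--         if char[1] > mayor_valor:
--             mayor_valor = char[1]
--
--     for char in tuplas:
--
--         if char[1] == mayor_valor:
--             respuesta.append(char)
--
--     return respuesta
-- ===== SOURCE B (Python) =====
-- def mayores_tuplas(tuplas):
--     mayor = 0
--     res = []
--     for char in tuplas:
--         if char[1] > mayor: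
--             mayor = char[1]
--             res = [char]
--         elif char[1] == mayor:
--             res.append(char)
--     return res
-- ===== Notes on version B (the rewrite author's own statement) =====
-- stated objective: simpler
-- what changed: Replaces A's two passes (find the max, then filter the equal ones) with a single pass that keeps the running max together with the accumulator, resetting it whenever a larger value appears.
import Mathlib
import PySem

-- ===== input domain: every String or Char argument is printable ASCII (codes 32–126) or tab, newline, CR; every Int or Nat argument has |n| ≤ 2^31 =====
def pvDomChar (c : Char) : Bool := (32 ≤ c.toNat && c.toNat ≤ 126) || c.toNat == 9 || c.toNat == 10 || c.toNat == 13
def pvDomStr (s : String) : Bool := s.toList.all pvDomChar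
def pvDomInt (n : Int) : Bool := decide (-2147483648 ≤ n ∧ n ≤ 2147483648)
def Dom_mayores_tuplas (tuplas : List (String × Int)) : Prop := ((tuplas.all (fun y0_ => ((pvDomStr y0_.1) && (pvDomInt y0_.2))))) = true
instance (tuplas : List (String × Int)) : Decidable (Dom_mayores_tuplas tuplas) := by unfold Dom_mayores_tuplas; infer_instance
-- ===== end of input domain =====

-- B fuses A's two passes (find max, then filter equal) into one pass keeping running max + accumulator.


-- ===== PORT A =====
-- first loop: running max seeded at 0
def mayoresA_max (tuplas : List (String × Int)) (m : Int) : Int :=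
  tuplas.foldl (fun mv c => if c.2 > mv then c.2 else mv) m

-- second loop: collect tuples whose value equals mayor_valor
def mayores_tuplas (tuplas : List (String × Int)) : List (String × Int) :=
  let mayor_valor := mayoresA_max tuplas 0
  tuplas.foldl (fun r c => if c.2 == mayor_valor then r ++ [c] else r) []

-- ===== PORT B =====
-- single pass: state (mayor, res); reset res on a strictly larger value, append on a tie
def mayoresB_step (st : Int × List (String × Int)) (c : String × Int) : Int × List (String × Int) :=
  if c.2 > st.1 then (c.2, [c])
  else if c.2 == st.1 then (st.1, st.2 ++ [c])
  else st

def mayores_tuplas_alt (tuplas : List (String × Int)) : List (String × Int) :=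
  (tuplas.foldl mayoresB_step (0, [])).2

-- ===== PRECONDITION & SPEC =====
def Spec_mayores_tuplas (tuplas : List (String × Int)) (out : List (String × Int)) : Prop := out = mayores_tuplas_alt tuplas
instance (tuplas : List (String × Int)) (out : List (String × Int)) : Decidable (Spec_mayores_tuplas tuplas out) := by unfold Spec_mayores_tuplas; infer_instance

-- ===== CLAIM (what is proved, stated in full; the proofs are below) =====
def Claim_equal_mayores_tuplas : Prop := ∀ (tuplas : List (String × Int)), Dom_mayores_tuplas tuplas → Spec_mayores_tuplas tuplas (mayores_tuplas tuplas)

-- ===== LEMMAS AND PROOFS =====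

theorem mayoresA_max_le (l : List (String × Int)) (m : Int) : m ≤ mayoresA_max l m := by
  induction l generalizing m with
  | nil => simp [mayoresA_max]
  | cons c t ih =>
    simp only [mayoresA_max, List.foldl_cons] at *
    split_ifs with h
    · exact le_trans (le_of_lt h) (ih c.2)
    · exact ih m

theorem mayoresA_filter (l : List (String × Int)) (v : Int) (r : List (String × Int)) :
    l.foldl (fun r c => if c.2 == v then r ++ [c] else r) r
      = r ++ l.filter (fun c => c.2 == v) := by
  induction l generalizing r with
  | nil => simp
  | cons c t ih =>
    simp only [List.foldl_cons, List.filter_cons]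
    split_ifs with h <;> simp [h] at * <;> simp [ih]

-- main invariant for B's single pass
theorem mayoresB_inv (l : List (String × Int)) (m : Int) (r : List (String × Int)) :
    l.foldl mayoresB_step (m, r)
      = (mayoresA_max l m,
         if mayoresA_max l m > m then l.filter (fun c => c.2 == mayoresA_max l m)
         else r ++ l.filter (fun c => c.2 == m)) := by
  induction l generalizing m r with
  | nil => simp [mayoresA_max]
  | cons c t ih =>
    have hM : ∀ m', mayoresA_max (c :: t) m'
        = mayoresA_max t (if c.2 > m' then c.2 else m') := by
      intro m'; simp [mayoresA_max]
    rw [List.foldl_cons]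
    by_cases h1 : c.2 > m
    · -- reset: state (c.2, [c])
      have hstep : mayoresB_step (m, r) c = (c.2, [c]) := by
        simp [mayoresB_step, h1]
      rw [hstep, ih, hM]
      simp only [if_pos h1]
      have hle : c.2 ≤ mayoresA_max t c.2 := mayoresA_max_le t c.2
      have hgt : mayoresA_max t c.2 > m := lt_of_lt_of_le h1 hle
      rw [if_pos hgt]
      by_cases h2 : mayoresA_max t c.2 > c.2
      · rw [if_pos h2]
        have hne : (c.2 == mayoresA_max t c.2) = false := by
          simp; omega
        simp [hne]
      · rw [if_neg h2]
        have heq : mayoresA_max t c.2 = c.2 := le_antisymm (not_lt.mp h2) hle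
        simp [heq]
    · by_cases h2 : c.2 = m
      · -- tie: append
        have hstep : mayoresB_step (m, r) c = (m, r ++ [c]) := by
          simp [mayoresB_step, h2]
        rw [hstep, ih, hM]
        simp only [if_neg h1]
        by_cases h3 : mayoresA_max t m > m
        · rw [if_pos h3, if_pos h3]
          have hne : (c.2 == mayoresA_max t m) = false := by simp; omega
          simp [hne]
        · rw [if_neg h3, if_neg h3]
          simp [h2]
      · -- smaller: skip
        have hstep : mayoresB_step (m, r) c = (m, r) := by
          simp [mayoresB_step, h1, h2]
        rw [hstep, ih, hM]
        simp only [if_neg h1]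
        have hne : (c.2 == m) = false := by simp [h2]
        by_cases h3 : mayoresA_max t m > m
        · rw [if_pos h3, if_pos h3]
          have hne2 : (c.2 == mayoresA_max t m) = false := by simp; omega
          simp [hne2]
        · rw [if_neg h3, if_neg h3]
          simp [hne]

-- ===== VERDICT (by name: the statement is the Claim_ definition above) =====
theorem mayores_tuplas_spec : Claim_equal_mayores_tuplas := by
  intro tuplas _
  unfold Spec_mayores_tuplas mayores_tuplas mayores_tuplas_alt
  rw [mayoresB_inv, mayoresA_filter]
  have hle : (0 : Int) ≤ mayoresA_max tuplas 0 := mayoresA_max_le tuplas 0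
  by_cases h : mayoresA_max tuplas 0 > 0
  · simp [h]
  · have heq : mayoresA_max tuplas 0 = 0 := le_antisymm (not_lt.mp h) hle
    simp [heq]
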